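-- pv_equiv track=rewrite | github.com/nawper02/blang3 | parser.py | find_outermost_block
-- ===== SOURCE A (Python) =====
-- def find_outermost_block(s: str, left_char: str, right_char: str):
--     # Function that takes a string and finds the outermost block specified by the left and right characters
--     # I wrote this method because re.findall doesn't work with nested brackets
--     left_index = None
--     right_index = None
--     # Loop from left to right until we find the first left character
--     for index, char in enumerate(s):
--         if char == left_char:
--             left_index = index
--             break
--     # Loop from right to left until we find the first right character
--     for index, char in enumerate(s[::-1]):
--         if char == right_char:
--             right_index = index
--             break
--     # If we found both characters, return the substring between them
--     if left_index is not None and right_index is not None: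
--         return s[left_index: len(s) - right_index]
--     else:
--         return None
-- ===== SOURCE B (Python) =====
-- def find_outermost_block(s, left_char, right_char):
--     # Single forward pass: first index equal to left_char, last index equal to right_char.
--     left_index = None
--     last_right = None
--     for index, char in enumerate(s):
--         if left_index is None and char == left_char:
--             left_index = index
--         if char == right_char:
--             last_right = index
--     if left_index is not None and last_right is not None:
--         return s[left_index: last_right + 1]
--     return None
-- ===== Notes on version B (the rewrite author's own statement) =====
-- stated objective: alternative
-- what changed: Replaces A's two directional scans (forward scan plus a scan over a reversed copy s[::-1]) by one forward pass that records the first left_char index and the last right_char index, then slices s[left:last_right+1]; no reversed copy is built.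
import Mathlib
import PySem

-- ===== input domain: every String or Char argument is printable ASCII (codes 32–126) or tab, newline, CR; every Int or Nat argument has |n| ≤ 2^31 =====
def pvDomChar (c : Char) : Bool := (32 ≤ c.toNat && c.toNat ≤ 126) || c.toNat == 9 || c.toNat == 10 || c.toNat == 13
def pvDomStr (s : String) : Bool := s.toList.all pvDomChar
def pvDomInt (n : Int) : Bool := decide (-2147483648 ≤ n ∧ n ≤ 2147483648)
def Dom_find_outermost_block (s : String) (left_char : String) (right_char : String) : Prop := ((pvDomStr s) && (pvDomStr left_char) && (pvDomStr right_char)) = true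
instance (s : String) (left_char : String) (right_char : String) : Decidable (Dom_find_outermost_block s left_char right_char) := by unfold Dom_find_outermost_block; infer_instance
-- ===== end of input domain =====

-- B fuses A's two directional scans (forward + over a reversed copy) into one forward pass
-- tracking the first left_char index and the last right_char index; same return value, proved equal.


-- ===== PORT A =====
-- A's 'for index, char in enumerate(…): if char == t: … break' scan; i is the running index.
-- 'char == t' compares the one-char string [c] with the argument string (on the list side).
def aScan (t : List Char) : List Char → Nat → Option Nat
  | [], _ => none
  | c :: rest, i => if [c] = t then some i else aScan t rest (i + 1)

def find_outermost_block (s : String) (left_char : String) (right_char : String) : Option String :=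
  let cs := s.toList
  let left_index := aScan left_char.toList cs 0
  -- s[::-1] is exact reversal (PySem.List.slice?_none_none_neg_one)
  let right_index := aScan right_char.toList cs.reverse 0
  match left_index, right_index with
  | some li, some ri =>
      some (String.ofList (PySem.List.slice cs (some (li : Int)) (some ((cs.length : Int) - (ri : Int)))))
  | _, _ => none

-- ===== PORT B =====
-- B's single forward pass: L = first index with char == left_char, R = last index with char == right_char.
def bScan (lc rc : List Char) : List Char → Nat → Option Nat → Option Nat → Option Nat × Option Nat
  | [], _, L, R => (L, R)
  | c :: rest, i, L, R =>
      bScan lc rc rest (i + 1)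
        (if L = none ∧ [c] = lc then some i else L)
        (if [c] = rc then some i else R)

def find_outermost_block_alt (s : String) (left_char : String) (right_char : String) : Option String :=
  let cs := s.toList
  let p := bScan left_char.toList right_char.toList cs 0 none none
  -- 'if left_index is not None and last_right is not None' as two nested Option cases
  match p.1 with
  | none => none
  | some li =>
    match p.2 with
    | none => none
    | some lr =>
        some (String.ofList (PySem.List.slice cs (some (li : Int)) (some ((lr : Int) + 1))))

-- ===== PRECONDITION & SPEC =====
def Spec_find_outermost_block (s : String) (left_char : String) (right_char : String) (out : Option String) : Prop := out = find_outermost_block_alt s left_char right_char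
instance (s : String) (left_char : String) (right_char : String) (out : Option String) : Decidable (Spec_find_outermost_block s left_char right_char out) := by unfold Spec_find_outermost_block; infer_instance

-- ===== CLAIM (what is proved, stated in full; the proofs are below) =====
def Claim_equal_find_outermost_block : Prop := ∀ (s : String) (left_char : String) (right_char : String), Dom_find_outermost_block s left_char right_char → Spec_find_outermost_block s left_char right_char (find_outermost_block s left_char right_char)

-- ===== LEMMAS AND PROOFS =====

/-- Index of the first element whose one-char string equals `t`. -/
def fIdx (t : List Char) : List Char → Option Nat
  | [] => none
  | c :: cs => if [c] = t then some 0 else (fIdx t cs).map (· + 1)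

/-- Index of the last element whose one-char string equals `t`. -/
def lIdx (t : List Char) : List Char → Option Nat
  | [] => none
  | c :: cs =>
    match lIdx t cs with
    | some j => some (j + 1)
    | none => if [c] = t then some 0 else none

theorem aScan_eq (t : List Char) (cs : List Char) (i : Nat) :
    aScan t cs i = (fIdx t cs).map (· + i) := by
  induction cs generalizing i with
  | nil => simp [aScan, fIdx]
  | cons c rest ih =>
    by_cases h : [c] = t
    · simp [aScan, fIdx, h]
    · simp only [aScan, fIdx, if_neg h, ih, Option.map_map]
      cases fIdx t rest <;> simp [Nat.add_comm 1 i]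

theorem fIdx_lt_length (t : List Char) (cs : List Char) (j : Nat)
    (h : fIdx t cs = some j) : j < cs.length := by
  induction cs generalizing j with
  | nil => simp [fIdx] at h
  | cons c rest ih =>
    by_cases hc : [c] = t
    · rw [fIdx, if_pos hc] at h
      cases h
      simp
    · simp only [fIdx, if_neg hc, Option.map_eq_some_iff] at h
      obtain ⟨k, hk, rfl⟩ := h
      have := ih k hk
      simp only [List.length_cons]
      omega

theorem fIdx_append (t : List Char) (xs ys : List Char) :
    fIdx t (xs ++ ys) =
      (match fIdx t xs with
       | some j => some j
       | none => (fIdx t ys).map (· + xs.length)) := by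
  induction xs with
  | nil => simp [fIdx]
  | cons c rest ih =>
    by_cases h : [c] = t
    · simp [fIdx, h]
    · simp only [List.cons_append, fIdx, if_neg h, ih]
      cases hr : fIdx t rest with
      | some j => simp
      | none =>
        cases fIdx t ys <;>
          simp [Nat.add_assoc]

theorem lIdx_eq_fIdx_reverse (t : List Char) (cs : List Char) :
    lIdx t cs = (fIdx t cs.reverse).map (fun j => cs.length - 1 - j) := by
  induction cs with
  | nil => simp [lIdx, fIdx]
  | cons c rest ih =>
    rw [List.reverse_cons, fIdx_append]
    cases hr : fIdx t rest.reverse with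
    | some j =>
      have hj : j < rest.length := by
        have := fIdx_lt_length t rest.reverse j hr
        simpa using this
      have hrest : lIdx t rest = some (rest.length - 1 - j) := by
        rw [ih, hr]; rfl
      simp only [lIdx, hrest, Option.map_some, List.length_cons,
        Option.some.injEq]
      omega
    | none =>
      have hrest : lIdx t rest = none := by rw [ih, hr]; rfl
      simp only [lIdx, hrest]
      by_cases h : [c] = t
      · simp [fIdx, h]
      · simp [fIdx, h]

theorem bScan_eq (lc rc : List Char) (cs : List Char) (i : Nat) (L R : Option Nat) :
    bScan lc rc cs i L R =
      ((match L with
        | some x => some x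
        | none => (fIdx lc cs).map (· + i)),
       (match lIdx rc cs with
        | some j => some (j + i)
        | none => R)) := by
  induction cs generalizing i L R with
  | nil => simp [bScan, fIdx, lIdx]; cases L <;> rfl
  | cons c rest ih =>
    simp only [bScan, ih, Prod.mk.injEq]
    constructor
    · -- left component: first match is kept
      by_cases hc : [c] = lc
      · cases L with
        | none => simp [fIdx, hc]
        | some x => simp [hc]
      · have hkeep : (if L = none ∧ [c] = lc then some i else L) = L := by
          simp [hc]
        rw [hkeep]
        cases L with
        | some x => rfl
        | none =>
          simp only [fIdx, if_neg hc, Option.map_map]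
          cases fIdx lc rest <;> simp [Nat.add_comm 1 i]
    · -- right component: last match overwrites
      cases hr : lIdx rc rest with
      | some j => simp [lIdx, hr, Nat.add_comm 1 i, Nat.add_assoc]
      | none =>
        by_cases hc : [c] = rc
        · simp [lIdx, hr, hc]
        · simp [lIdx, hr, hc]

-- ===== VERDICT (by name: the statement is the Claim_ definition above) =====
theorem find_outermost_block_spec : Claim_equal_find_outermost_block := by
  intro s lc rc _
  unfold Spec_find_outermost_block find_outermost_block find_outermost_block_alt
  simp only [aScan_eq, bScan_eq, Nat.add_zero, Option.map_id']
  cases hl : fIdx lc.toList s.toList with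
  | none =>
    cases hr : fIdx rc.toList s.toList.reverse with
    | none => simp
    | some ri => simp
  | some li =>
    cases hr : fIdx rc.toList s.toList.reverse with
    | none => simp [lIdx_eq_fIdx_reverse, hr]
    | some ri =>
      have hri : ri < s.length := by
        have := fIdx_lt_length _ _ _ hr
        simpa using this
      have key : ((s.length - 1 - ri : Nat) : Int) + 1
          = (s.length : Int) - (ri : Int) := by omega
      simp [lIdx_eq_fIdx_reverse, hr, key]
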